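-- pv_equiv track=rewrite | github.com/huangketsudou/algorithms | kickstart/B2020RobotPathDecoding.py | solve
-- ===== SOURCE A (Python) =====
-- from collections import defaultdict, deque
--
-- def solve(path):
-- #只能解决小数据集
--     border = 10 ** 9
--     w = h = 0
--     dictionary = defaultdict(int)
--     d = {'N': 0, "S": 1, "E": 2, "W": 3}
--     stack = deque()
--     N = len(path)
--     tmp = ''
--     for i in range(N):
--         if tmp=='':
--             tmp+=path[i]
--         elif path[i]=='(':
--             stack.append(tmp)
--             tmp=''
--         elif tmp.isdigit() != path[i].isdigit():
--             stack.append(tmp)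
--             tmp=path[i]
--         elif path[i]==')':
--             while stack and stack[-1].isdigit() == tmp.isdigit():
--                 tmp=stack.pop()+tmp
--             if stack:
--                 tmp=int(stack.pop())*tmp
--         else:
--             tmp+=path[i]
--
--     while stack:
--         tmp=stack.pop()+tmp
--     north=tmp.count('N')
--     south=tmp.count('S')
--     east=tmp.count('E')
--     west=tmp.count('W')
--     w=(east-west+1) % border
--     h=(south-north+1) % border
--     if w==0:w=border
--     if h==0:h=border
--     return w, h
-- ===== SOURCE B (Python) =====
-- def solve(path):
--     # Same tokenised scan, but instead of building the expanded path string,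
--     # every pending segment is kept as a constant-size summary: direction
--     # counts, an all-digits flag, the digit token text and the (virtual) length.
--     border = 10 ** 9
--     ZERO = (0, 0, 0, 0, False, '', 0)  # (N, S, E, W, all-digits, digit text, length)
--
--     def unit(c):
--         if c.isdigit():
--             return (0, 0, 0, 0, True, c, 1)
--         return (int(c == 'N'), int(c == 'S'), int(c == 'E'), int(c == 'W'),
--                 False, '', 1)
--
--     def glue(a, b):  # summary of the concatenation a + b
--         if a[6] == 0:
--             return b
--         if b[6] == 0:
--             return a
--         dig = a[4] and b[4]
--         return (a[0] + b[0], a[1] + b[1], a[2] + b[2], a[3] + b[3], dig,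
--                 a[5] + b[5] if dig else '', a[6] + b[6])
--
--     stack = []
--     cur = ZERO
--     for c in path:
--         if cur[6] == 0:
--             cur = unit(c)
--         elif c == '(':
--             stack.append(cur)
--             cur = ZERO
--         elif cur[4] != c.isdigit():
--             stack.append(cur)
--             cur = unit(c)
--         elif c == ')':
--             while stack and stack[-1][4] == cur[4]:
--                 cur = glue(stack.pop(), cur)
--             if stack:
--                 m = int(stack.pop()[5])
--                 if m == 0:
--                     cur = ZERO
--                 else:
--                     cur = (m * cur[0], m * cur[1], m * cur[2], m * cur[3],
--                            False, '', m * cur[6])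
--         else:
--             cur = glue(cur, unit(c))
--     for seg in reversed(stack):
--         cur = (cur[0] + seg[0], cur[1] + seg[1], cur[2] + seg[2],
--                cur[3] + seg[3], False, '', cur[6] + seg[6])
--     w = (cur[2] - cur[3] + 1) % border
--     h = (cur[1] - cur[0] + 1) % border
--     return (w if w else border, h if h else border)
-- ===== Notes on version B (the rewrite author's own statement) =====
-- stated objective: alternative
-- what changed: B never builds the expanded path string: it runs the same tokenised scan but keeps each pending segment only as a constant-size summary (four direction counts, all-digits flag, digit token text, virtual length), multiplying the counts when a repeat group closes instead of repeating strings.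
import Mathlib
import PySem

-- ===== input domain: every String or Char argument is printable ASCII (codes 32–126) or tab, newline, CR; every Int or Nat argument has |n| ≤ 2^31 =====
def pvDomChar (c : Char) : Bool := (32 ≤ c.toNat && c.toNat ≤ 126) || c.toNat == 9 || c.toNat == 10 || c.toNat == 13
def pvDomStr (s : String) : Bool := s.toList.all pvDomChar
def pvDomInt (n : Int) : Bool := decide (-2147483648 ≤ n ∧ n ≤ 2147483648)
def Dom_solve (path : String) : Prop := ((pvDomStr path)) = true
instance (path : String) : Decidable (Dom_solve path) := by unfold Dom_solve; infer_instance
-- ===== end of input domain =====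

-- B replaces A's string expansion (exponential for nested repeats) by one scan over
-- constant-size segment summaries (direction counts + digit token); same return value.

-- ===== PORT A =====
-- A's deque is represented as a Lean list with the TOP at the head (append/pop at
-- the right of the deque = cons/uncons here); Python strings are carried as List Char.

-- the inner `while stack and stack[-1].isdigit() == tmp.isdigit(): tmp = stack.pop() + tmp`
def solvePop (stack : List (List Char)) (tmp : List Char) : List (List Char) × List Char :=
  match stack with
  | [] => ([], tmp)
  | s :: rest =>
    if PySem.Chars.strIsdigit s == PySem.Chars.strIsdigit tmp then solvePop rest (s ++ tmp)
    else (s :: rest, tmp)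

-- one iteration of A's `for i in range(N)` body; state = (stack, tmp).
-- `int(stack.pop())` is ported as `(PySem.Int.ofChars? s).getD 0`: at this call site the
-- popped string is all digits (the while-loop above stops only on a digit-parity flip),
-- so Python's int() never raises and the `.getD 0` default is unreachable.
def solveStep (st : List (List Char) × List Char) (c : Char) : List (List Char) × List Char :=
  if st.2 = [] then (st.1, st.2 ++ [c])
  else if c = '(' then (st.2 :: st.1, [])
  else if PySem.Chars.strIsdigit st.2 != PySem.Chars.isdigit c then (st.2 :: st.1, [c])
  else if c = ')' then
    match solvePop st.1 st.2 with
    | ([], t) => ([], t)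
    | (s :: rest, t) => (rest, PySem.List.pyRepeat t ((PySem.Int.ofChars? s).getD 0))
  else (st.1, st.2 ++ [c])

def solve (path : String) : Int × Int :=
  let st := path.toList.foldl solveStep ([], [])
  -- `while stack: tmp = stack.pop() + tmp`
  let f := st.1.foldl (fun t s => s ++ t) st.2
  let border : Int := 1000000000
  let north : Int := f.count 'N'
  let south : Int := f.count 'S'
  let east : Int := f.count 'E'
  let west : Int := f.count 'W'
  let w := PySem.Int.mod (east - west + 1) border
  let h := PySem.Int.mod (south - north + 1) border
  (if w = 0 then border else w, if h = 0 then border else h)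

-- ===== PORT B =====
-- Source B's 7-tuple segment summary (N, S, E, W, all-digits, digit text, length)
structure Seg where
  n : Int
  s : Int
  e : Int
  w : Int
  dig : Bool
  txt : List Char
  len : Int
deriving DecidableEq, Repr

def zeroSeg : Seg := ⟨0, 0, 0, 0, false, [], 0⟩

def unitSeg (c : Char) : Seg :=
  if PySem.Chars.isdigit c then ⟨0, 0, 0, 0, true, [c], 1⟩
  else ⟨if c = 'N' then 1 else 0, if c = 'S' then 1 else 0,
        if c = 'E' then 1 else 0, if c = 'W' then 1 else 0, false, [], 1⟩

def glueSeg (a b : Seg) : Seg :=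
  if a.len = 0 then b
  else if b.len = 0 then a
  else ⟨a.n + b.n, a.s + b.s, a.e + b.e, a.w + b.w, a.dig && b.dig,
        if a.dig && b.dig then a.txt ++ b.txt else [], a.len + b.len⟩

-- Source B's `while stack and stack[-1][4] == cur[4]: cur = glue(stack.pop(), cur)`
def altPop (stack : List Seg) (cur : Seg) : List Seg × Seg :=
  match stack with
  | [] => ([], cur)
  | sg :: rest => if sg.dig == cur.dig then altPop rest (glueSeg sg cur) else (sg :: rest, cur)

def altStep (st : List Seg × Seg) (c : Char) : List Seg × Seg :=
  if st.2.len = 0 then (st.1, unitSeg c)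
  else if c = '(' then (st.2 :: st.1, zeroSeg)
  else if st.2.dig != PySem.Chars.isdigit c then (st.2 :: st.1, unitSeg c)
  else if c = ')' then
    match altPop st.1 st.2 with
    | ([], t) => ([], t)
    | (sg :: rest, t) =>
      let m := (PySem.Int.ofChars? sg.txt).getD 0
      if m = 0 then (rest, zeroSeg)
      else (rest, ⟨m * t.n, m * t.s, m * t.e, m * t.w, false, [], m * t.len⟩)
  else (st.1, glueSeg st.2 (unitSeg c))

def solve_alt (path : String) : Int × Int :=
  let st := path.toList.foldl altStep ([], zeroSeg)
  -- `for seg in reversed(stack): cur = cur + seg (counts and length)`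
  let f := st.1.foldl
    (fun acc sg => Seg.mk (acc.n + sg.n) (acc.s + sg.s) (acc.e + sg.e) (acc.w + sg.w)
      false [] (acc.len + sg.len)) st.2
  let border : Int := 1000000000
  let w := PySem.Int.mod (f.e - f.w + 1) border
  let h := PySem.Int.mod (f.s - f.n + 1) border
  (if w = 0 then border else w, if h = 0 then border else h)

-- ===== PRECONDITION & SPEC =====
def Spec_solve (path : String) (out : Int × Int) : Prop := out = solve_alt path
instance (path : String) (out : Int × Int) : Decidable (Spec_solve path out) := by
  unfold Spec_solve; infer_instance

-- ===== CLAIM (what is proved, stated in full; the proofs are below) =====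
def Claim_equal_solve : Prop := ∀ (path : String), Dom_solve path → Spec_solve path (solve path)

-- ===== LEMMAS AND PROOFS =====

-- the summary of a concrete string: what B keeps instead of the string itself
def summ (s : List Char) : Seg :=
  ⟨(s.count 'N' : Int), (s.count 'S' : Int), (s.count 'E' : Int), (s.count 'W' : Int),
   PySem.Chars.strIsdigit s, if PySem.Chars.strIsdigit s then s else [], (s.length : Int)⟩

theorem summ_nil : summ [] = zeroSeg := by
  simp [summ, zeroSeg, PySem.Chars.strIsdigit]

theorem summ_len_zero_iff (t : List Char) : (summ t).len = 0 ↔ t = [] := by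
  simp [summ]

theorem isdigit_ne (c d : Char) (hc : PySem.Chars.isdigit c = true)
    (hd : PySem.Chars.isdigit d = false) : c ≠ d := by
  intro h; rw [h, hd] at hc; cases hc

theorem strIsdigit_singleton (c : Char) :
    PySem.Chars.strIsdigit [c] = PySem.Chars.isdigit c := by
  simp [PySem.Chars.strIsdigit]

theorem summ_singleton (c : Char) : summ [c] = unitSeg c := by
  by_cases hc : PySem.Chars.isdigit c = true
  · have hN : (c == 'N') = false := beq_eq_false_iff_ne.mpr (isdigit_ne c 'N' hc (by decide))
    have hS : (c == 'S') = false := beq_eq_false_iff_ne.mpr (isdigit_ne c 'S' hc (by decide))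
    have hE : (c == 'E') = false := beq_eq_false_iff_ne.mpr (isdigit_ne c 'E' hc (by decide))
    have hW : (c == 'W') = false := beq_eq_false_iff_ne.mpr (isdigit_ne c 'W' hc (by decide))
    simp only [summ, unitSeg, strIsdigit_singleton, hc, List.count_cons, List.count_nil,
      hN, hS, hE, hW, if_true, Seg.mk.injEq]
    and_intros <;> first | rfl | trivial
  · have hc' : PySem.Chars.isdigit c = false := by
      cases h : PySem.Chars.isdigit c
      · rfl
      · exact absurd h hc
    simp only [summ, unitSeg, strIsdigit_singleton, hc', List.count_cons, List.count_nil,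
      Seg.mk.injEq, Bool.false_eq_true, if_false, beq_iff_eq]
    and_intros <;> first | rfl | trivial | (split_ifs <;> simp_all)

theorem strIsdigit_false_of_mem (s : List Char) (x : Char) (hx : x ∈ s)
    (hxd : PySem.Chars.isdigit x = false) : PySem.Chars.strIsdigit s = false := by
  cases hall : s.all PySem.Chars.isdigit
  · simp [PySem.Chars.strIsdigit, hall]
  · have := List.all_eq_true.mp hall x hx
    rw [hxd] at this; cases this

theorem exists_nondigit (s : List Char) (h : PySem.Chars.strIsdigit s = false)
    (hne : s ≠ []) : ∃ x ∈ s, PySem.Chars.isdigit x = false := by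
  by_contra hq
  push_neg at hq
  have hall : s.all PySem.Chars.isdigit = true := by
    refine List.all_eq_true.mpr (fun x hx => ?_)
    cases hxx : PySem.Chars.isdigit x
    · exact absurd hxx (hq x hx)
    · rfl
  have hie : s.isEmpty = false := by
    cases s
    · exact absurd rfl hne
    · rfl
  rw [PySem.Chars.strIsdigit, hie, hall] at h
  simp at h

theorem strIsdigit_append_left (s t : List Char) (hs : PySem.Chars.strIsdigit s = false)
    (hne : s ≠ []) : PySem.Chars.strIsdigit (s ++ t) = false := by
  obtain ⟨x, hx, hxd⟩ := exists_nondigit s hs hne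
  exact strIsdigit_false_of_mem _ x (List.mem_append_left _ hx) hxd

theorem strIsdigit_append_right (s t : List Char) (ht : PySem.Chars.strIsdigit t = false)
    (hne : t ≠ []) : PySem.Chars.strIsdigit (s ++ t) = false := by
  obtain ⟨x, hx, hxd⟩ := exists_nondigit t ht hne
  exact strIsdigit_false_of_mem _ x (List.mem_append_right _ hx) hxd

theorem strIsdigit_append (s t : List Char) (hs : s ≠ []) (ht : t ≠ []) :
    PySem.Chars.strIsdigit (s ++ t)
      = (PySem.Chars.strIsdigit s && PySem.Chars.strIsdigit t) := by
  cases s with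
  | nil => exact absurd rfl hs
  | cons a l =>
    cases t with
    | nil => exact absurd rfl ht
    | cons b m =>
      simp [PySem.Chars.strIsdigit, List.all_append, Bool.and_assoc]

theorem summ_append (s t : List Char) : summ (s ++ t) = glueSeg (summ s) (summ t) := by
  rcases eq_or_ne s [] with rfl | hs
  · rw [summ_nil]
    simp [glueSeg, zeroSeg]
  rcases eq_or_ne t [] with rfl | ht
  · rw [summ_nil]
    unfold glueSeg
    rw [if_neg (by rw [summ_len_zero_iff]; exact hs),
        if_pos (show zeroSeg.len = 0 from rfl)]
    simp
  · unfold glueSeg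
    rw [if_neg (by rw [summ_len_zero_iff]; exact hs),
        if_neg (by rw [summ_len_zero_iff]; exact ht)]
    have hdig := strIsdigit_append s t hs ht
    simp [summ, Seg.mk.injEq, List.count_append, List.length_append, hdig]
    split <;> simp_all

theorem count_flatten_replicate (k : Nat) (t : List Char) (a : Char) :
    ((List.replicate k t).flatten).count a = k * t.count a := by
  induction k with
  | zero => simp
  | succ k ih => simp [List.replicate_succ, List.count_append, ih, Nat.succ_mul, Nat.add_comm]

theorem length_flatten_replicate (k : Nat) (t : List Char) :
    ((List.replicate k t).flatten).length = k * t.length := by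
  induction k with
  | zero => simp
  | succ k ih => simp [List.replicate_succ, ih, Nat.succ_mul, Nat.add_comm]

theorem flatten_replicate_nil (k : Nat) : (List.replicate k ([] : List Char)).flatten = [] := by
  induction k with
  | zero => rfl
  | succ k ih => simp [List.replicate_succ, ih]

theorem summ_pyRepeat (t : List Char) (m : Int) (hm : 0 ≤ m)
    (ht : PySem.Chars.strIsdigit t = false) :
    summ (PySem.List.pyRepeat t m) =
      if m = 0 then zeroSeg
      else ⟨m * (t.count 'N' : Int), m * (t.count 'S' : Int), m * (t.count 'E' : Int),
            m * (t.count 'W' : Int), false, [], m * (t.length : Int)⟩ := by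
  rcases eq_or_ne m 0 with rfl | hm0
  · rw [if_pos rfl]
    rw [show PySem.List.pyRepeat t (0 : Int) = [] from by rw [PySem.List.pyRepeat]; rfl]
    exact summ_nil
  have hk : m = (m.toNat : Int) := (Int.toNat_of_nonneg hm).symm
  rw [if_neg hm0]
  rcases eq_or_ne t [] with rfl | htne
  · rw [show PySem.List.pyRepeat ([] : List Char) m = []
        from by rw [PySem.List.pyRepeat, flatten_replicate_nil], summ_nil]
    simp [zeroSeg]
  · have hkpos : 0 < m.toNat := by omega
    have hdig : PySem.Chars.strIsdigit ((List.replicate m.toNat t).flatten) = false := by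
      obtain ⟨k', hk'⟩ : ∃ k', m.toNat = k' + 1 := ⟨m.toNat - 1, by omega⟩
      rw [hk', List.replicate_succ, List.flatten_cons]
      exact strIsdigit_append_left _ _ ht htne
    rw [PySem.List.pyRepeat]
    unfold summ
    rw [hdig, count_flatten_replicate, count_flatten_replicate, count_flatten_replicate,
        count_flatten_replicate, length_flatten_replicate]
    simp only [Bool.false_eq_true, if_false, Seg.mk.injEq]
    and_intros <;> first | rfl | trivial | (push_cast; rw [← hk])

theorem dropWhile_eq_self_of_all (p : Char → Bool) (l : List Char)
    (h : ∀ x ∈ l, p x = false) : List.dropWhile p l = l := by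
  cases l with
  | nil => rfl
  | cons a m =>
    rw [List.dropWhile_cons]
    simp [h a List.mem_cons_self]

theorem optNat_nonneg (X : Option Nat) :
    0 ≤ (Option.map (fun n : Int => n)
          (Bind.bind X (fun a : Nat => Pure.pure ((a : Nat) : Int)))).getD 0 := by
  cases X <;> simp

theorem ofChars?_digit_nonneg (s : List Char) (h : PySem.Chars.strIsdigit s = true) :
    0 ≤ (PySem.Int.ofChars? s).getD 0 := by
  have hne : s ≠ [] := by
    intro h'
    subst h'
    simp [PySem.Chars.strIsdigit] at h
  have hall : ∀ x ∈ s, PySem.Chars.isdigit x = true := by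
    refine List.all_eq_true.mp ?_
    cases hq : s.all PySem.Chars.isdigit
    · rw [PySem.Chars.strIsdigit, hq, Bool.and_false] at h
      cases h
    · rfl
  have hspace : ∀ x ∈ s, PySem.Int.isIntSpace x = false := by
    intro x hx
    have hd := hall x hx
    rw [PySem.Int.isIntSpace]
    simp only [Bool.or_eq_false_iff, decide_eq_false_iff_not]
    refine ⟨⟨⟨⟨⟨?_, ?_⟩, ?_⟩, ?_⟩, ?_⟩, ?_⟩ <;> intro hh <;> rw [hh] at hd <;>
      exact absurd hd (by decide)
  have hclean : (List.dropWhile PySem.Int.isIntSpace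
      (List.dropWhile PySem.Int.isIntSpace s).reverse).reverse = s := by
    rw [dropWhile_eq_self_of_all _ s hspace,
        dropWhile_eq_self_of_all _ s.reverse (fun x hx => hspace x (List.mem_reverse.mp hx)),
        List.reverse_reverse]
  unfold PySem.Int.ofChars?
  rw [hclean]
  show 0 ≤ (PySem.Int.ofChars?.match_1 (fun _ => Option Int) s _ _ _).getD 0
  split <;>
    first
      | exact optNat_nonneg _
      | exact absurd (hall '-' (by simp)) (by decide)

theorem pop_rel (stack : List (List Char)) (tmp : List Char)
    (h : PySem.Chars.strIsdigit tmp = false) (hne : tmp ≠ []) :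
    altPop (stack.map summ) (summ tmp) =
      ((solvePop stack tmp).1.map summ, summ (solvePop stack tmp).2)
    ∧ PySem.Chars.strIsdigit (solvePop stack tmp).2 = false
    ∧ (solvePop stack tmp).2 ≠ []
    ∧ (∀ s' rest, (solvePop stack tmp).1 = s' :: rest → PySem.Chars.strIsdigit s' = true) := by
  induction stack generalizing tmp with
  | nil =>
    refine ⟨rfl, h, hne, ?_⟩
    intro s' rest hh
    simp [solvePop] at hh
  | cons s rest ih =>
    have hsd : (summ s).dig = PySem.Chars.strIsdigit s := rfl
    have htd : (summ tmp).dig = PySem.Chars.strIsdigit tmp := rfl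
    cases hguard : (PySem.Chars.strIsdigit s == PySem.Chars.strIsdigit tmp) with
    | true =>
      have hsf : PySem.Chars.strIsdigit s = false := by
        have := beq_iff_eq.mp hguard
        rw [this, h]
      have h2 : PySem.Chars.strIsdigit (s ++ tmp) = false :=
        strIsdigit_append_right s tmp h hne
      have hne2 : s ++ tmp ≠ [] := by
        intro hx
        exact hne (List.append_eq_nil_iff.mp hx).2
      have step := ih (s ++ tmp) h2 hne2
      constructor
      · show altPop (summ s :: rest.map summ) (summ tmp) = _
        rw [altPop]
        rw [hsd, htd, hguard, if_pos rfl]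
        rw [summ_append] at step
        rw [step.1]
        rw [solvePop, hguard]
        simp
      · rw [solvePop, hguard]
        exact ⟨step.2.1, step.2.2.1, step.2.2.2⟩
    | false =>
      have hst : PySem.Chars.strIsdigit s = true := by
        have hne' := beq_eq_false_iff_ne.mp hguard
        cases hq : PySem.Chars.strIsdigit s
        · exact absurd (hq.trans h.symm) hne'
        · rfl
      refine ⟨?_, ?_⟩
      · show altPop (summ s :: rest.map summ) (summ tmp) = _
        rw [altPop, hsd, htd, hguard, if_neg (by simp), solvePop, hguard]
        simp
      · rw [solvePop, hguard]
        refine ⟨h, hne, ?_⟩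
        intro s' r' hh
        have hh2 : s :: rest = s' :: r' := hh
        cases hh2
        exact hst

theorem step_rel (stack : List (List Char)) (tmp : List Char) (c : Char) :
    altStep (stack.map summ, summ tmp) c =
      ((solveStep (stack, tmp) c).1.map summ, summ (solveStep (stack, tmp) c).2) := by
  by_cases htmp : tmp = []
  · subst htmp
    rw [altStep, solveStep]
    rw [if_pos (by rw [summ_len_zero_iff]), if_pos rfl]
    simp [summ_singleton]
  · rw [altStep, solveStep]
    rw [if_neg (by rw [summ_len_zero_iff]; exact htmp), if_neg htmp]
    by_cases hc : c = '('
    · rw [if_pos hc, if_pos hc]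
      simp [summ_nil]
    rw [if_neg hc, if_neg hc]
    have hdigeq : (summ tmp).dig = PySem.Chars.strIsdigit tmp := rfl
    rw [hdigeq]
    by_cases hg : (PySem.Chars.strIsdigit tmp != PySem.Chars.isdigit c) = true
    · rw [if_pos hg, if_pos hg]
      simp [summ_singleton]
    rw [if_neg hg, if_neg hg]
    by_cases hcr : c = ')'
    · have hdig : PySem.Chars.strIsdigit tmp = false := by
        have heq : PySem.Chars.strIsdigit tmp = PySem.Chars.isdigit c := by
          cases hq : PySem.Chars.strIsdigit tmp <;> cases hq2 : PySem.Chars.isdigit c <;>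
            simp_all
        rw [heq, hcr]
        decide
      rw [if_pos hcr, if_pos hcr]
      obtain ⟨hpop, hd2, hne2, htop⟩ := pop_rel stack tmp hdig htmp
      rcases hsp : solvePop stack tmp with ⟨p1, p2⟩
      rw [hsp] at hpop hd2 hne2 htop
      simp only at hpop hd2 hne2 htop
      rw [hpop]
      cases p1 with
      | nil => rfl
      | cons s' r' =>
        have hs't : PySem.Chars.strIsdigit s' = true := htop s' r' rfl
        have htxt : (summ s').txt = s' := by simp [summ, hs't]
        have hm0 : 0 ≤ (PySem.Int.ofChars? s').getD 0 := ofChars?_digit_nonneg s' hs't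
        show (if (PySem.Int.ofChars? (summ s').txt).getD 0 = 0 then (List.map summ r', zeroSeg)
              else (List.map summ r',
                ⟨(PySem.Int.ofChars? (summ s').txt).getD 0 * (summ p2).n,
                 (PySem.Int.ofChars? (summ s').txt).getD 0 * (summ p2).s,
                 (PySem.Int.ofChars? (summ s').txt).getD 0 * (summ p2).e,
                 (PySem.Int.ofChars? (summ s').txt).getD 0 * (summ p2).w, false, [],
                 (PySem.Int.ofChars? (summ s').txt).getD 0 * (summ p2).len⟩))
            = (List.map summ r',
               summ (PySem.List.pyRepeat p2 ((PySem.Int.ofChars? s').getD 0)))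
        rw [htxt, summ_pyRepeat _ _ hm0 hd2]
        by_cases hz : (PySem.Int.ofChars? s').getD 0 = 0
        · rw [if_pos hz, if_pos hz]
        · rw [if_neg hz, if_neg hz]
          rfl
    · rw [if_neg hcr, if_neg hcr]
      rw [summ_append, summ_singleton]

theorem fold_rel (cs : List Char) (stack : List (List Char)) (tmp : List Char) :
    cs.foldl altStep (stack.map summ, summ tmp) =
      ((cs.foldl solveStep (stack, tmp)).1.map summ,
       summ (cs.foldl solveStep (stack, tmp)).2) := by
  induction cs generalizing stack tmp with
  | nil => rfl
  | cons c cs ih =>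
    simp only [List.foldl_cons, step_rel]
    exact ih (solveStep (stack, tmp) c).1 (solveStep (stack, tmp) c).2

theorem final_rel (stack : List (List Char)) (x : Seg) (t : List Char)
    (hn : x.n = (t.count 'N' : Int)) (hs : x.s = (t.count 'S' : Int))
    (he : x.e = (t.count 'E' : Int)) (hw : x.w = (t.count 'W' : Int)) :
    ((stack.map summ).foldl
        (fun acc sg => Seg.mk (acc.n + sg.n) (acc.s + sg.s) (acc.e + sg.e) (acc.w + sg.w)
          false [] (acc.len + sg.len)) x).n
        = ((stack.foldl (fun t s => s ++ t) t).count 'N' : Int)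
    ∧ ((stack.map summ).foldl
        (fun acc sg => Seg.mk (acc.n + sg.n) (acc.s + sg.s) (acc.e + sg.e) (acc.w + sg.w)
          false [] (acc.len + sg.len)) x).s
        = ((stack.foldl (fun t s => s ++ t) t).count 'S' : Int)
    ∧ ((stack.map summ).foldl
        (fun acc sg => Seg.mk (acc.n + sg.n) (acc.s + sg.s) (acc.e + sg.e) (acc.w + sg.w)
          false [] (acc.len + sg.len)) x).e
        = ((stack.foldl (fun t s => s ++ t) t).count 'E' : Int)
    ∧ ((stack.map summ).foldl
        (fun acc sg => Seg.mk (acc.n + sg.n) (acc.s + sg.s) (acc.e + sg.e) (acc.w + sg.w)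
          false [] (acc.len + sg.len)) x).w
        = ((stack.foldl (fun t s => s ++ t) t).count 'W' : Int) := by
  induction stack generalizing x t with
  | nil => exact ⟨hn, hs, he, hw⟩
  | cons s rest ih =>
    simp only [List.map_cons, List.foldl_cons]
    apply ih
    all_goals simp [summ, List.count_append, hn, hs, he, hw] <;> push_cast <;> ring

-- ===== VERDICT (by name: the statement is the Claim_ definition above) =====
theorem solve_spec : Claim_equal_solve := by
  intro path _
  show solve path = solve_alt path
  unfold solve solve_alt
  have h0 : (([], zeroSeg) : List Seg × Seg)
      = ((([] : List (List Char)).map summ), summ []) := by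
    simp [summ_nil]
  rw [h0, fold_rel]
  obtain ⟨hn, hs, he, hw⟩ := final_rel (path.toList.foldl solveStep ([], [])).1
      (summ (path.toList.foldl solveStep ([], [])).2)
      ((path.toList.foldl solveStep ([], [])).2) rfl rfl rfl rfl
  simp only [hn, hs, he, hw]
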